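-- pv_equiv track=rewrite | github.com/EOLIVE43/pergola-guide | build_site.py | _bloc_pagination
-- ===== SOURCE A (Python) =====
-- def _bloc_pagination(page_actuelle, nb_pages):
--     """Génère le bloc de pagination avec liens Précédent/Suivant et numéros.
--     page_actuelle commence à 1. nb_pages est le total des pages."""
--     if nb_pages <= 1:
--         return ""
--
--     def url_page(n):
--         """URL d'une page. Page 1 = /blog.html, sinon /blog/page-N.html"""
--         return "/blog.html" if n == 1 else f"/blog/page-{n}.html"
--
--     html = '<nav class="pagination" aria-label="Pagination des articles du blog">'
--     # Précédent
--     if page_actuelle > 1: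
--         html += f'<a href="{url_page(page_actuelle - 1)}" class="pagination-nav" rel="prev">‹ Précédent</a>'
--     else:
--         html += '<span class="pagination-nav pagination-disabled">‹ Précédent</span>'
--
--     # Numéros de pages (on affiche page actuelle ± 2, avec … si besoin)
--     html += '<div class="pagination-numbers">'
--     for n in range(1, nb_pages + 1):
--         if n == page_actuelle:
--             html += f'<span class="pagination-current" aria-current="page">{n}</span>'
--         elif n == 1 or n == nb_pages or abs(n - page_actuelle) <= 2:
--             html += f'<a href="{url_page(n)}" class="pagination-link">{n}</a>'
--         elif abs(n - page_actuelle) == 3: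
--             html += '<span class="pagination-ellipsis">…</span>'
--     html += '</div>'
--
--     # Suivant
--     if page_actuelle < nb_pages:
--         html += f'<a href="{url_page(page_actuelle + 1)}" class="pagination-nav" rel="next">Suivant ›</a>'
--     else:
--         html += '<span class="pagination-nav pagination-disabled">Suivant ›</span>'
--
--     html += '</nav>'
--     return html
-- ===== SOURCE B (Python) =====
-- def _bloc_pagination(page_actuelle, nb_pages):
--     """O(1) re-implementation: emit only the constant-size window of page
--     numbers (1, pages within 3 of the current page, last page) instead of
--     scanning every page."""
--     if nb_pages <= 1:
--         return ""
--     p, nb = page_actuelle, nb_pages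
--
--     def url_page(n):
--         return "/blog.html" if n == 1 else f"/blog/page-{n}.html"
--
--     def link(n):
--         return f'<a href="{url_page(n)}" class="pagination-link">{n}</a>'
--
--     def current(n):
--         return f'<span class="pagination-current" aria-current="page">{n}</span>'
--
--     def inner(n):
--         if abs(n - p) == 3:
--             return '<span class="pagination-ellipsis">…</span>'
--         return current(n) if n == p else link(n)
--
--     lo, hi = max(2, p - 3), min(nb - 1, p + 3)
--     middle = "".join(inner(n) for n in range(lo, hi + 1))
--     prev_part = (f'<a href="{url_page(p - 1)}" class="pagination-nav" rel="prev">‹ Précédent</a>'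
--                  if p > 1 else '<span class="pagination-nav pagination-disabled">‹ Précédent</span>')
--     next_part = (f'<a href="{url_page(p + 1)}" class="pagination-nav" rel="next">Suivant ›</a>'
--                  if p < nb else '<span class="pagination-nav pagination-disabled">Suivant ›</span>')
--     numbers = (current(1) if p == 1 else link(1)) + middle + (current(nb) if p == nb else link(nb))
--     return ('<nav class="pagination" aria-label="Pagination des articles du blog">'
--             + prev_part + '<div class="pagination-numbers">' + numbers
--             + '</div>' + next_part + '</nav>')
-- ===== Notes on version B (the rewrite author's own statement) =====
-- stated objective: faster
-- what changed: A scans every page number from 1 to nb_pages and appends a piece (usually nothing) per page; B directly emits only the constant-size visible window — page 1, the pages within 3 of the current page clamped to [2, nb_pages-1], and the last page — so the work no longer depends on nb_pages.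
import Mathlib
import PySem

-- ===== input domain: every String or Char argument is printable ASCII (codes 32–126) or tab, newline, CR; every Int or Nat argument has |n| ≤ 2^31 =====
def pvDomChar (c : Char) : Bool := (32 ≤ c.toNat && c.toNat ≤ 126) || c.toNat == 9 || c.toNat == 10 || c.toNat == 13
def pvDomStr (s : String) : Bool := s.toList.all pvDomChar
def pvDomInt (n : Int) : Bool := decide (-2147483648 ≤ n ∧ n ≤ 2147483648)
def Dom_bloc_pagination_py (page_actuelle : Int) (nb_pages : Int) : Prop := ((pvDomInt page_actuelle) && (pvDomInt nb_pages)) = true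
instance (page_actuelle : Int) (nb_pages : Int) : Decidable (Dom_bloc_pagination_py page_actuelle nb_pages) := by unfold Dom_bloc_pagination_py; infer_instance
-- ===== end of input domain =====

-- B replaces A's scan over all nb_pages page numbers by directly emitting the
-- constant-size window {1} ∪ [p-3, p+3] ∪ {nb} of visible entries: O(1) instead of O(nb_pages).

-- ===== PORT A =====
-- url_page(n)
def pvUrlPage (n : Int) : String :=
  if n = 1 then "/blog.html" else "/blog/page-" ++ PySem.Int.toStr n ++ ".html"

def bloc_pagination_py (page_actuelle : Int) (nb_pages : Int) : String :=
  if nb_pages ≤ 1 then "" else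
  let html := "<nav class=\"pagination\" aria-label=\"Pagination des articles du blog\">"
  let html := html ++ (if page_actuelle > 1 then
      "<a href=\"" ++ pvUrlPage (page_actuelle - 1) ++ "\" class=\"pagination-nav\" rel=\"prev\">‹ Précédent</a>"
    else "<span class=\"pagination-nav pagination-disabled\">‹ Précédent</span>")
  let html := html ++ "<div class=\"pagination-numbers\">"
  let html := (PySem.List.pyRange 1 (nb_pages + 1) 1).foldl (fun acc n =>
      if n = page_actuelle then
        acc ++ "<span class=\"pagination-current\" aria-current=\"page\">" ++ PySem.Int.toStr n ++ "</span>"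
      else if n = 1 ∨ n = nb_pages ∨ |n - page_actuelle| ≤ 2 then
        acc ++ "<a href=\"" ++ pvUrlPage n ++ "\" class=\"pagination-link\">" ++ PySem.Int.toStr n ++ "</a>"
      else if |n - page_actuelle| = 3 then
        acc ++ "<span class=\"pagination-ellipsis\">…</span>"
      else acc) html
  let html := html ++ "</div>"
  let html := html ++ (if page_actuelle < nb_pages then
      "<a href=\"" ++ pvUrlPage (page_actuelle + 1) ++ "\" class=\"pagination-nav\" rel=\"next\">Suivant ›</a>"
    else "<span class=\"pagination-nav pagination-disabled\">Suivant ›</span>")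
  html ++ "</nav>"

-- ===== PORT B =====
-- link(n)
def pvLink (n : Int) : String :=
  "<a href=\"" ++ pvUrlPage n ++ "\" class=\"pagination-link\">" ++ PySem.Int.toStr n ++ "</a>"
-- current(n)
def pvCurrent (n : Int) : String :=
  "<span class=\"pagination-current\" aria-current=\"page\">" ++ PySem.Int.toStr n ++ "</span>"
-- inner(n)
def pvInner (p : Int) (n : Int) : String :=
  if |n - p| = 3 then "<span class=\"pagination-ellipsis\">…</span>"
  else if n = p then pvCurrent n else pvLink n

def bloc_pagination_py_alt (page_actuelle : Int) (nb_pages : Int) : String :=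
  if nb_pages ≤ 1 then "" else
  let p := page_actuelle
  let nb := nb_pages
  let lo := max 2 (p - 3)
  let hi := min (nb - 1) (p + 3)
  let middle := String.join ((PySem.List.pyRange lo (hi + 1) 1).map (pvInner p))
  let prevPart := if p > 1 then
      "<a href=\"" ++ pvUrlPage (p - 1) ++ "\" class=\"pagination-nav\" rel=\"prev\">‹ Précédent</a>"
    else "<span class=\"pagination-nav pagination-disabled\">‹ Précédent</span>"
  let nextPart := if p < nb then
      "<a href=\"" ++ pvUrlPage (p + 1) ++ "\" class=\"pagination-nav\" rel=\"next\">Suivant ›</a>"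
    else "<span class=\"pagination-nav pagination-disabled\">Suivant ›</span>"
  let numbers := (if p = 1 then pvCurrent 1 else pvLink 1) ++ middle ++ (if p = nb then pvCurrent nb else pvLink nb)
  "<nav class=\"pagination\" aria-label=\"Pagination des articles du blog\">"
    ++ prevPart ++ "<div class=\"pagination-numbers\">" ++ numbers ++ "</div>" ++ nextPart ++ "</nav>"

-- ===== PRECONDITION & SPEC =====
def Spec_bloc_pagination_py (page_actuelle : Int) (nb_pages : Int) (out : String) : Prop := out = bloc_pagination_py_alt page_actuelle nb_pages
instance (page_actuelle : Int) (nb_pages : Int) (out : String) : Decidable (Spec_bloc_pagination_py page_actuelle nb_pages out) := by unfold Spec_bloc_pagination_py; infer_instance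

-- ===== CLAIM (what is proved, stated in full; the proofs are below) =====
def Claim_equal_bloc_pagination_py : Prop := ∀ (page_actuelle : Int) (nb_pages : Int), Dom_bloc_pagination_py page_actuelle nb_pages → Spec_bloc_pagination_py page_actuelle nb_pages (bloc_pagination_py page_actuelle nb_pages)

-- ===== LEMMAS AND PROOFS =====

-- the string A's loop body appends at index n ("" when the body leaves acc unchanged)
def pvPieceA (p nb n : Int) : String :=
  if n = p then pvCurrent n
  else if n = 1 ∨ n = nb ∨ |n - p| ≤ 2 then pvLink n
  else if |n - p| = 3 then "<span class=\"pagination-ellipsis\">…</span>"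
  else ""

theorem pv_foldl_str (l : List String) (a : String) :
    l.foldl (· ++ ·) a = a ++ l.foldl (· ++ ·) "" := by
  induction l generalizing a with
  | nil => simp [String.append_empty]
  | cons x t ih =>
      rw [List.foldl_cons, ih, List.foldl_cons, ih ("" ++ x), String.empty_append,
        String.append_assoc]

theorem pv_join_nil : String.join ([] : List String) = "" := rfl

theorem pv_join_cons (x : String) (l : List String) :
    String.join (x :: l) = x ++ String.join l := by
  simp only [String.join, List.foldl_cons, String.empty_append]
  exact pv_foldl_str l x

theorem pv_join_append (a b : List String) :
    String.join (a ++ b) = String.join a ++ String.join b := by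
  induction a with
  | nil => simp [String.join, String.empty_append]
  | cons x t ih =>
      rw [List.cons_append, pv_join_cons, ih, pv_join_cons, String.append_assoc]

theorem pv_foldl_piece (p nb : Int) (l : List Int) (init : String) :
    l.foldl (fun acc n =>
      if n = p then
        acc ++ "<span class=\"pagination-current\" aria-current=\"page\">" ++ PySem.Int.toStr n ++ "</span>"
      else if n = 1 ∨ n = nb ∨ |n - p| ≤ 2 then
        acc ++ "<a href=\"" ++ pvUrlPage n ++ "\" class=\"pagination-link\">" ++ PySem.Int.toStr n ++ "</a>"
      else if |n - p| = 3 then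
        acc ++ "<span class=\"pagination-ellipsis\">…</span>"
      else acc) init
    = init ++ String.join (l.map (pvPieceA p nb)) := by
  induction l generalizing init with
  | nil => simp [String.join, String.append_empty]
  | cons x t ih =>
      simp only [List.foldl_cons, List.map_cons, pv_join_cons, ih]
      by_cases h1 : x = p
      · simp [pvPieceA, h1, pvCurrent, String.append_assoc]
      · by_cases h2 : x = 1 ∨ x = nb ∨ |x - p| ≤ 2
        · simp [pvPieceA, h1, h2, pvLink, String.append_assoc]
        · rw [not_or, not_or] at h2
          obtain ⟨h21, h22, h23⟩ := h2
          by_cases h3 : |x - p| = 3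
          · simp [pvPieceA, h1, h21, h22, h3, String.append_assoc]
          · simp [pvPieceA, h1, h21, h22, h23, h3, String.empty_append]

theorem pv_join_empty (p nb : Int) (l : List Int)
    (h : ∀ n ∈ l, pvPieceA p nb n = "") :
    String.join (l.map (pvPieceA p nb)) = "" := by
  induction l with
  | nil => rfl
  | cons x t ih =>
      rw [List.map_cons, pv_join_cons, h x (by simp),
        ih (fun n hn => h n (by simp [hn])), String.empty_append]

theorem pv_piece_zero (p nb n : Int) (h1 : n ≠ p) (h2 : n ≠ 1) (h3 : n ≠ nb)
    (h4 : n < p - 3 ∨ p + 3 < n) : pvPieceA p nb n = "" := by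
  have h5 : ¬ |n - p| ≤ 2 := by rw [abs_le]; omega
  have h6 : ¬ |n - p| = 3 := by rw [abs_eq (by norm_num : (0:Int) ≤ 3)]; omega
  simp [pvPieceA, h1, h2, h3, h5, h6]

theorem pv_piece_inner (p nb n : Int) (h2 : n ≠ 1) (h3 : n ≠ nb)
    (h4 : p - 3 ≤ n ∧ n ≤ p + 3) : pvPieceA p nb n = pvInner p n := by
  by_cases h1 : n = p
  · simp [pvPieceA, pvInner, h1]
  · by_cases h5 : |n - p| = 3
    · have h6 : ¬ |n - p| ≤ 2 := by omega
      simp [pvPieceA, pvInner, h1, h2, h3, h5]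
    · have ha : |n - p| ≤ 3 := by rw [abs_le]; omega
      have h6 : |n - p| ≤ 2 := by omega
      simp [pvPieceA, pvInner, h1, h2, h3, h5, h6]

-- the middle of A's loop (pages strictly between 1 and nb) equals B's window join
theorem pv_middle (p nb : Int) (hnb : 2 ≤ nb) :
    String.join ((PySem.List.pyRange 2 nb 1).map (pvPieceA p nb))
      = String.join ((PySem.List.pyRange (max 2 (p - 3)) (min (nb - 1) (p + 3) + 1) 1).map (pvInner p)) := by
  set lo := max 2 (p - 3) with hlo
  set hi := min (nb - 1) (p + 3) with hhi
  by_cases hcase : lo ≤ hi + 1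
  · -- non-empty (or touching) window: split the full range at lo and hi+1
    rw [PySem.List.pyRange_one_append 2 lo nb (by omega) (by omega),
        PySem.List.pyRange_one_append lo (hi + 1) nb hcase (by omega)]
    rw [List.map_append, List.map_append, pv_join_append, pv_join_append]
    have hleft : String.join ((PySem.List.pyRange 2 lo 1).map (pvPieceA p nb)) = "" := by
      apply pv_join_empty
      intro n hn
      rw [PySem.List.mem_pyRange_one] at hn
      exact pv_piece_zero p nb n (by omega) (by omega) (by omega) (by omega)
    have hright : String.join ((PySem.List.pyRange (hi + 1) nb 1).map (pvPieceA p nb)) = "" := by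
      apply pv_join_empty
      intro n hn
      rw [PySem.List.mem_pyRange_one] at hn
      exact pv_piece_zero p nb n (by omega) (by omega) (by omega) (by omega)
    have hmid : (PySem.List.pyRange lo (hi + 1) 1).map (pvPieceA p nb)
        = (PySem.List.pyRange lo (hi + 1) 1).map (pvInner p) := by
      apply List.map_congr_left
      intro n hn
      rw [PySem.List.mem_pyRange_one] at hn
      exact pv_piece_inner p nb n (by omega) (by omega) ⟨by omega, by omega⟩
    rw [hleft, hright, hmid, String.empty_append, String.append_empty]
  · -- empty window: every interior page is further than 3 from p
    rw [PySem.List.pyRange_one_eq_nil (by omega : hi + 1 ≤ lo)]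
    have hall : String.join ((PySem.List.pyRange 2 nb 1).map (pvPieceA p nb)) = "" := by
      apply pv_join_empty
      intro n hn
      rw [PySem.List.mem_pyRange_one] at hn
      exact pv_piece_zero p nb n (by omega) (by omega) (by omega) (by omega)
    rw [hall]; rfl

theorem pv_piece_one (p nb : Int) :
    pvPieceA p nb 1 = if p = 1 then pvCurrent 1 else pvLink 1 := by
  by_cases h : p = 1
  · simp [pvPieceA, h]
  · have h1 : (1:Int) ≠ p := fun he => h he.symm
    simp [pvPieceA, h, h1]

theorem pv_piece_nb (p nb : Int) :
    pvPieceA p nb nb = if p = nb then pvCurrent nb else pvLink nb := by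
  by_cases h : p = nb
  · simp [pvPieceA, h]
  · have h1 : nb ≠ p := fun he => h he.symm
    simp [pvPieceA, h, h1]

-- ===== VERDICT (by name: the statement is the Claim_ definition above) =====
theorem bloc_pagination_py_spec : Claim_equal_bloc_pagination_py := by
  intro p nb _
  unfold Spec_bloc_pagination_py bloc_pagination_py bloc_pagination_py_alt
  by_cases hle : nb ≤ 1
  · simp [hle]
  · have hnb : 2 ≤ nb := by omega
    simp only [hle, if_false]
    rw [pv_foldl_piece]
    -- split range(1, nb+1) as [1] ++ range(2, nb) ++ [nb]
    rw [PySem.List.pyRange_one_cons (by omega : (1:Int) < nb + 1)]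
    rw [show (1:Int) + 1 = 2 by ring,
        PySem.List.pyRange_one_succ_right (by omega : (2:Int) ≤ nb)]
    rw [List.map_cons, List.map_append, List.map_cons, List.map_nil,
        pv_join_cons, pv_join_append, pv_join_cons]
    rw [pv_middle p nb hnb, pv_piece_one p nb, pv_piece_nb p nb]
    simp only [pv_join_nil, String.append_assoc, String.append_empty]
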